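-- pv_equiv track=rewrite | github.com/triple4t/gov-ai-platform | backend/scripts/prd_eight_services_benchmark.py | build_answers
-- ===== SOURCE A (Python) =====
-- def _filler(need: int) -> str:
--     line = (
--         "Benchmark context line: citizen services, APIs, data stores, and compliance checks. "
--     )
--     if need <= 0:
--         return ""
--     out = []
--     cur = 0
--     while cur < need:
--         take = min(len(line), need - cur)
--         out.append(line[:take])
--         cur += take
--     return "".join(out)
--
-- def build_answers(cap_id: str, target_total_chars: int) -> dict[str, str]:
--     """Pack ~target_total_chars into capability answers (sum of values)."""
--     if cap_id == "prd":
--         base = {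
--             "product_name": "Bench Product",
--             "audience": "Engineers",
--             "problem_statement": "Benchmark problem statement.",
--             "solution_overview": "Benchmark solution overview.",
--             "functional_requirements": "",
--         }
--         used = sum(len(v) for k, v in base.items() if k != "functional_requirements")
--         need = max(0, target_total_chars - used)
--         base["functional_requirements"] = _filler(need) or "F1."
--         return base
--
--     if cap_id == "tech_docs":
--         base = {"audience": "Backend engineers", "depth": ""}
--         used = len(base["audience"])
--         base["depth"] = _filler(max(0, target_total_chars - used)) or "High-level."
--         return base
--
--     if cap_id == "flow_diagram":
--         return {"flow_scope": _filler(target_total_chars) or "Login flow.", "actors": ""}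
--
--     if cap_id == "sop":
--         base = {"sop_topic": "Production release", "environment": ""}
--         used = len(base["sop_topic"])
--         base["environment"] = _filler(max(0, target_total_chars - used)) or "Cloud."
--         return base
--
--     if cap_id == "code_review":
--         return {"focus": _filler(target_total_chars) or "Security."}
--
--     if cap_id == "architecture":
--         return {"viewpoint": _filler(target_total_chars) or "Container view."}
--
--     if cap_id == "cdg":
--         return {"scope": _filler(target_total_chars) or "backend/"}
--
--     raise ValueError(f"Unknown capability for answers: {cap_id}")
-- ===== SOURCE B (Python) =====
-- def _filler(need: int) -> str:
--     line = (
--         "Benchmark context line: citizen services, APIs, data stores, and compliance checks. "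
--     )
--     if need <= 0:
--         return ""
--     # closed form: whole copies of the line plus the exact remainder prefix
--     return line * (need // len(line)) + line[: need % len(line)]
--
--
-- def _or(s: str, default: str) -> str:
--     return s if s else default
--
--
-- def build_answers(cap_id: str, target_total_chars: int) -> dict[str, str]:
--     """Pack ~target_total_chars into capability answers (sum of values)."""
--     # fixed overheads: 78 = len of the four fixed prd fields, 17 = "Backend engineers", 18 = "Production release"
--     if cap_id == "prd":
--         return {
--             "product_name": "Bench Product",
--             "audience": "Engineers",
--             "problem_statement": "Benchmark problem statement.",
--             "solution_overview": "Benchmark solution overview.",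
--             "functional_requirements": _or(_filler(max(0, target_total_chars - 78)), "F1."),
--         }
--     if cap_id == "tech_docs":
--         return {
--             "audience": "Backend engineers",
--             "depth": _or(_filler(max(0, target_total_chars - 17)), "High-level."),
--         }
--     if cap_id == "flow_diagram":
--         return {"flow_scope": _or(_filler(target_total_chars), "Login flow."), "actors": ""}
--     if cap_id == "sop":
--         return {
--             "sop_topic": "Production release",
--             "environment": _or(_filler(max(0, target_total_chars - 18)), "Cloud."),
--         }
--     if cap_id == "code_review":
--         return {"focus": _or(_filler(target_total_chars), "Security.")}
--     if cap_id == "architecture":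
--         return {"viewpoint": _or(_filler(target_total_chars), "Container view.")}
--     if cap_id == "cdg":
--         return {"scope": _or(_filler(target_total_chars), "backend/")}
--     raise ValueError(f"Unknown capability for answers: {cap_id}")
-- ===== Notes on version B (the rewrite author's own statement) =====
-- stated objective: simpler
-- what changed: The accumulating while-loop in _filler is replaced by a closed-form construction (whole-copy repetition plus remainder prefix via // and %), and the dicts are built as single literals with precomputed fixed-field lengths instead of mutating a base dict.
import Mathlib
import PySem

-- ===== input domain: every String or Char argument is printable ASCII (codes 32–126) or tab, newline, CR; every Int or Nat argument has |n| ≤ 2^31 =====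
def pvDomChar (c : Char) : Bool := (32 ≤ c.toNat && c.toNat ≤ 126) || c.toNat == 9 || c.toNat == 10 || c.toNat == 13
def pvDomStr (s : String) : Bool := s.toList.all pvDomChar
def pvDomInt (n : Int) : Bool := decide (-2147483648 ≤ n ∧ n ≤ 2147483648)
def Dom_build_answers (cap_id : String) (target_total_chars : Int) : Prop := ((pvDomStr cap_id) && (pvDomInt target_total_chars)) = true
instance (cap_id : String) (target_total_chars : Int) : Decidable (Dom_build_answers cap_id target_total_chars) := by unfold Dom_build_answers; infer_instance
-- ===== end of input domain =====

-- B replaces the _filler while-loop by a closed form (repetition + remainder prefix) and builds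
-- the answer dicts as single literals; equivalence is about the return value (A mutates no argument).

-- ===== PORT A =====

-- the base line of _filler, as code points (84 printable-ASCII chars)
def lineA : List Char := "Benchmark context line: citizen services, APIs, data stores, and compliance checks. ".toList

-- the while-loop of _filler: out accumulates the pieces line[:take]; "".join is the final flatten
def fillerLoopA (need cur : Int) (out : List (List Char)) : List (List Char) :=
  if cur < need then
    fillerLoopA need (cur + min 84 (need - cur)) (out ++ [lineA.take (min 84 (need - cur)).toNat])
  else out
termination_by (need - cur).toNat
decreasing_by omega

def fillerA (need : Int) : String :=
  if need ≤ 0 then "" else String.mk (fillerLoopA need 0 []).flatten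

def build_answers (cap_id : String) (target_total_chars : Int) : List (String × String) :=
  if cap_id = "prd" then
    let base := PySem.Dict.ofList [("product_name", "Bench Product"), ("audience", "Engineers"),
      ("problem_statement", "Benchmark problem statement."),
      ("solution_overview", "Benchmark solution overview."), ("functional_requirements", "")]
    let used : Int := base.items.foldl
      (fun a p => if p.1 ≠ "functional_requirements" then a + (PySem.Str.len p.2 : Int) else a) 0
    let need := max 0 (target_total_chars - used)
    let f := fillerA need
    (base.insert "functional_requirements" (if f = "" then "F1." else f)).items
  else if cap_id = "tech_docs" then
    let base := PySem.Dict.ofList [("audience", "Backend engineers"), ("depth", "")]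
    -- base["audience"]: the key is present in the literal dict, so get? is some
    let used : Int := (PySem.Str.len ((base.get? "audience").getD "") : Int)
    let f := fillerA (max 0 (target_total_chars - used))
    (base.insert "depth" (if f = "" then "High-level." else f)).items
  else if cap_id = "flow_diagram" then
    let f := fillerA target_total_chars
    [("flow_scope", if f = "" then "Login flow." else f), ("actors", "")]
  else if cap_id = "sop" then
    let base := PySem.Dict.ofList [("sop_topic", "Production release"), ("environment", "")]
    let used : Int := (PySem.Str.len ((base.get? "sop_topic").getD "") : Int)
    let f := fillerA (max 0 (target_total_chars - used))
    (base.insert "environment" (if f = "" then "Cloud." else f)).items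
  else if cap_id = "code_review" then
    let f := fillerA target_total_chars
    [("focus", if f = "" then "Security." else f)]
  else if cap_id = "architecture" then
    let f := fillerA target_total_chars
    [("viewpoint", if f = "" then "Container view." else f)]
  else if cap_id = "cdg" then
    let f := fillerA target_total_chars
    [("scope", if f = "" then "backend/" else f)]
  else []  -- Python raises ValueError here; excluded by Pre_build_answers

-- ===== PORT B =====

def lineB : List Char := "Benchmark context line: citizen services, APIs, data stores, and compliance checks. ".toList

-- closed form: line * (need // 84) + line[: need % 84]
def fillerB (need : Int) : String :=
  if need ≤ 0 then "" else
    String.mk ((List.replicate (PySem.Int.floordiv need 84).toNat lineB).flatten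
      ++ lineB.take (PySem.Int.mod need 84).toNat)

def orB (s dflt : String) : String := if s = "" then dflt else s

def build_answers_alt (cap_id : String) (target_total_chars : Int) : List (String × String) :=
  if cap_id = "prd" then
    [("product_name", "Bench Product"), ("audience", "Engineers"),
     ("problem_statement", "Benchmark problem statement."),
     ("solution_overview", "Benchmark solution overview."),
     ("functional_requirements", orB (fillerB (max 0 (target_total_chars - 78))) "F1.")]
  else if cap_id = "tech_docs" then
    [("audience", "Backend engineers"),
     ("depth", orB (fillerB (max 0 (target_total_chars - 17))) "High-level.")]
  else if cap_id = "flow_diagram" then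
    [("flow_scope", orB (fillerB target_total_chars) "Login flow."), ("actors", "")]
  else if cap_id = "sop" then
    [("sop_topic", "Production release"),
     ("environment", orB (fillerB (max 0 (target_total_chars - 18))) "Cloud.")]
  else if cap_id = "code_review" then
    [("focus", orB (fillerB target_total_chars) "Security.")]
  else if cap_id = "architecture" then
    [("viewpoint", orB (fillerB target_total_chars) "Container view.")]
  else if cap_id = "cdg" then
    [("scope", orB (fillerB target_total_chars) "backend/")]
  else []  -- Python raises ValueError here; excluded by Pre_build_answers

-- ===== PRECONDITION & SPEC =====
-- A raises ValueError exactly on unknown capability ids; Pre_ admits the seven known ids.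
def Pre_build_answers (cap_id : String) (target_total_chars : Int) : Prop :=
  cap_id = "prd" ∨ cap_id = "tech_docs" ∨ cap_id = "flow_diagram" ∨ cap_id = "sop" ∨
  cap_id = "code_review" ∨ cap_id = "architecture" ∨ cap_id = "cdg"

instance (cap_id : String) (target_total_chars : Int) : Decidable (Pre_build_answers cap_id target_total_chars) := by
  unfold Pre_build_answers; infer_instance

def pvWitness_build_answers : String × Int := ("prd", 200)

def Spec_build_answers (cap_id : String) (target_total_chars : Int) (out : List (String × String)) : Prop := out = build_answers_alt cap_id target_total_chars
instance (cap_id : String) (target_total_chars : Int) (out : List (String × String)) : Decidable (Spec_build_answers cap_id target_total_chars out) := by unfold Spec_build_answers; infer_instance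

-- ===== CLAIM (what is proved, stated in full; the proofs are below) =====
def Claim_equal_build_answers : Prop := ∀ (cap_id : String) (target_total_chars : Int), Dom_build_answers cap_id target_total_chars → Pre_build_answers cap_id target_total_chars → Spec_build_answers cap_id target_total_chars (build_answers cap_id target_total_chars)

-- ===== LEMMAS AND PROOFS =====

-- the pieces produced by A's loop, indexed by the remaining Nat budget
def goPieces (m : Nat) : List (List Char) :=
  if h : m = 0 then [] else lineA.take (min 84 m) :: goPieces (m - min 84 m)
termination_by m
decreasing_by omega

lemma fillerLoopA_eq_goPieces (m : Nat) : ∀ (need cur : Int) (out : List (List Char)),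
    (need - cur).toNat = m → fillerLoopA need cur out = out ++ goPieces m := by
  induction m using Nat.strong_induction_on with
  | _ m ih =>
    intro need cur out hm
    rw [fillerLoopA]
    split
    · rename_i h
      rw [ih (m - min 84 m) (by omega) _ _ _ (by omega)]
      conv_rhs => rw [goPieces]
      have ht : (min (84:Int) (need - cur)).toNat = min 84 m := by omega
      rw [dif_neg (show m ≠ 0 by omega)]
      simp [ht]
    · have h0 : m = 0 := by omega
      simp [h0, goPieces]

lemma lineA_length : lineA.length = 84 := by decide

lemma goPieces_flatten (m : Nat) :
    (goPieces m).flatten = (List.replicate (m / 84) lineA).flatten ++ lineA.take (m % 84) := by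
  induction m using Nat.strong_induction_on with
  | _ m ih =>
    rw [goPieces]
    by_cases h0 : m = 0
    · simp [h0]
    · rw [dif_neg h0]
      by_cases h84 : m < 84
      · have hmin : min 84 m = m := by omega
        have hd : m / 84 = 0 := by omega
        have hr : m % 84 = m := by omega
        simp [hmin, hd, hr, goPieces]
      · have hmin : min 84 m = 84 := by omega
        have hd : m / 84 = (m - 84) / 84 + 1 := by omega
        have hr : m % 84 = (m - 84) % 84 := by omega
        have htake : lineA.take 84 = lineA := List.take_of_length_le (by rw [lineA_length])
        rw [hmin, htake, hd, hr, List.flatten_cons, ih (m - 84) (by omega)]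
        simp [List.replicate_succ]

lemma lineB_eq_lineA : lineB = lineA := rfl

lemma fillerA_eq_fillerB (need : Int) : fillerA need = fillerB need := by
  unfold fillerA fillerB
  rw [lineB_eq_lineA]
  by_cases h : need ≤ 0
  · simp [h]
  · rw [if_neg h, if_neg h]
    rw [fillerLoopA_eq_goPieces need.toNat need 0 [] (by omega)]
    rw [List.nil_append, goPieces_flatten]
    have h84 : (0:Int) < 84 := by omega
    have hd : (PySem.Int.floordiv need 84).toNat = need.toNat / 84 := by
      rw [PySem.Int.floordiv_eq_ediv_of_pos h84]; omega
    have hr : (PySem.Int.mod need 84).toNat = need.toNat % 84 := by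
      rw [PySem.Int.mod_eq_emod_of_pos h84]; omega
    rw [hd, hr]

-- ===== VERDICT (by name: the statement is the Claim_ definition above) =====
theorem build_answers_spec : Claim_equal_build_answers := by
  intro cap_id t _ hpre
  unfold Spec_build_answers build_answers build_answers_alt
  have h78 : ("Bench Product".length : Int) + "Engineers".length +
      "Benchmark problem statement.".length + "Benchmark solution overview.".length = 78 := by decide
  rcases hpre with h | h | h | h | h | h | h <;>
    simp [h, fillerA_eq_fillerB, orB, PySem.Dict.ofList, PySem.Dict.insert,
      PySem.Dict.update, PySem.Dict.empty, PySem.Dict.contains, PySem.Dict.get?,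
      PySem.Str.len, List.foldl, h78]
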